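-- pv_equiv track=rewrite | github.com/detiuaveiro/Tetris-AI | agent.py | check_complete_lines
-- ===== SOURCE A (Python) =====
-- def check_complete_lines(filled,height):
-- 	pieces_by_line={}
-- 	for c,l in filled:
-- 		if height-l not in pieces_by_line:
-- 			pieces_by_line[height-l]=1
-- 		else:
-- 			pieces_by_line[height-l]+=1
-- 	return sum(value == 8 for value in pieces_by_line.values())
-- ===== SOURCE B (Python) =====
-- def check_complete_lines(filled, height):
--     keys = sorted(height - l for c, l in filled)
--     total = 0
--     run = 0
--     prev = None
--     for k in keys:
--         if k == prev:
--             run += 1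
--         else:
--             total += run == 8
--             run = 1
--             prev = k
--     total += run == 8
--     return total
-- ===== Notes on version B (the rewrite author's own statement) =====
-- stated objective: alternative
-- what changed: B maintains no dict at all: it sorts the line keys once and makes a single run-length scan over the sorted sequence with (total, run, prev) accumulators, adding 1 whenever a run closes with length exactly 8.
import Mathlib
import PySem

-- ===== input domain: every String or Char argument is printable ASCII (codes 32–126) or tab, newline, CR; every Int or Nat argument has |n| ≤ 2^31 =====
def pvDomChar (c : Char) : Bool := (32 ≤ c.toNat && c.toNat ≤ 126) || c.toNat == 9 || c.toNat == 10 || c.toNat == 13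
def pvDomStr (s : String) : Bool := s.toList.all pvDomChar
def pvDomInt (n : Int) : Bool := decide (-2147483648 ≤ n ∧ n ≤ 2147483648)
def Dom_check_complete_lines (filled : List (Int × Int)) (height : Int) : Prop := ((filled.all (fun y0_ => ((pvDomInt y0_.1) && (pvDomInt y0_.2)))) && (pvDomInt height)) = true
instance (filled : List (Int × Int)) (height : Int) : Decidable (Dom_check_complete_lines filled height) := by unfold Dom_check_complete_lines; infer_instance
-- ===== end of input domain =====

-- B replaces A's dict tally by sort-then-run-length-scan (alternative algorithm, not claimed faster).

-- ===== PORT A =====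
-- builds pieces_by_line incrementally, then sums (value == 8) over its values
def check_complete_lines (filled : List (Int × Int)) (height : Int) : Int :=
  let pieces_by_line : PySem.Dict Int Int :=
    filled.foldl (fun d cl =>
      if d.contains (height - cl.2) = false then d.insert (height - cl.2) 1
      else d.insert (height - cl.2) (d.getD (height - cl.2) 0 + 1)) PySem.Dict.empty
  (pieces_by_line.values.map (fun v => if v == (8 : Int) then (1 : Int) else 0)).sum

-- ===== PORT B =====
-- the for-loop over the sorted keys, with state (total, run, prev)
def cclScan : List Int → Int → Int → Option Int → Int
  | [], total, run, _ => total + (if run == (8 : Int) then 1 else 0)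
  | k :: rest, total, run, prev =>
    if some k == prev then cclScan rest total (run + 1) prev
    else cclScan rest (total + (if run == (8 : Int) then 1 else 0)) 1 (some k)

def check_complete_lines_alt (filled : List (Int × Int)) (height : Int) : Int :=
  let keys := PySem.List.sorted (filled.map (fun cl => height - cl.2)) (fun x => x) false
  cclScan keys 0 0 none

-- ===== PRECONDITION & SPEC =====
def Spec_check_complete_lines (filled : List (Int × Int)) (height : Int) (out : Int) : Prop := out = check_complete_lines_alt filled height
instance (filled : List (Int × Int)) (height : Int) (out : Int) : Decidable (Spec_check_complete_lines filled height out) := by unfold Spec_check_complete_lines; infer_instance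

-- ===== CLAIM =====
def Claim_equal_check_complete_lines : Prop := ∀ (filled : List (Int × Int)) (height : Int), Dom_check_complete_lines filled height → Spec_check_complete_lines filled height (check_complete_lines filled height)

-- ===== LEMMAS AND PROOFS =====

-- number of distinct values occurring exactly 8 times
def gcount (l : List Int) : Int :=
  ((PySem.List.dedup l).map (fun k => if l.count k == (8 : Int) then (1 : Int) else 0)).sum

-- A's guarded loop body is the unconditional counter step: on an absent key getD is 0.
theorem ccl_body_eq (d : PySem.Dict Int Int) (k : Int) :
    (if d.contains k = false then d.insert k 1
     else d.insert k (d.getD k 0 + 1)) = d.insert k (d.getD k 0 + 1) := by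
  by_cases h : d.contains k = false
  · rw [if_pos h, PySem.Dict.getD_of_not_contains d 0 h]
    norm_num
  · rw [if_neg h]

-- A's dict is Counter(lines)
theorem ccl_fold_eq_counter (filled : List (Int × Int)) (height : Int) :
    filled.foldl (fun d cl =>
      if d.contains (height - cl.2) = false then d.insert (height - cl.2) 1
      else d.insert (height - cl.2) (d.getD (height - cl.2) 0 + 1)) PySem.Dict.empty
    = PySem.Dict.counter (filled.map (fun cl => height - cl.2)) := by
  rw [← PySem.Dict.foldl_insert_getD_add_one_eq_counter, List.foldl_map]
  congr 1
  funext d cl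
  exact ccl_body_eq d (height - cl.2)

theorem ccl_A_eq_gcount (filled : List (Int × Int)) (height : Int) :
    check_complete_lines filled height = gcount (filled.map (fun cl => height - cl.2)) := by
  unfold check_complete_lines gcount
  rw [ccl_fold_eq_counter]
  simp only [PySem.Dict.values, PySem.Dict.items_counter, List.map_map, ← PySem.List.dedup_eq_ofList]
  congr 1

-- gcount as a Finset sum (so it is permutation invariant)
theorem gcount_eq_finset_sum (l : List Int) :
    gcount l = ∑ k ∈ l.toFinset, (if l.count k == (8 : Int) then (1 : Int) else 0) := by
  have hperm : (PySem.List.dedup l).Perm l.dedup := by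
    rw [List.perm_ext_iff_of_nodup (PySem.List.nodup_dedup l) l.nodup_dedup]
    intro x
    rw [PySem.List.mem_dedup, List.mem_dedup]
  have := (hperm.map (fun k => if l.count k == (8 : Int) then (1 : Int) else 0)).sum_eq
  unfold gcount
  rw [this]
  rfl

theorem gcount_perm {l l' : List Int} (h : l.Perm l') : gcount l = gcount l' := by
  rw [gcount_eq_finset_sum, gcount_eq_finset_sum, List.toFinset_eq_of_perm _ _ h]
  exact Finset.sum_congr rfl (fun k _ => by rw [h.count_eq])

-- peel one distinct value off gcount
theorem gcount_cons (k : Int) (rest : List Int) :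
    gcount (k :: rest) = (if rest.count k + 1 == (8 : Int) then 1 else 0)
      + gcount (rest.filter (fun x => x ≠ k)) := by
  rw [gcount_eq_finset_sum, gcount_eq_finset_sum]
  have hk : k ∉ (rest.filter (fun x => x ≠ k)).toFinset := by
    simp [List.mem_toFinset]
  have hfin : (k :: rest).toFinset = insert k (rest.filter (fun x => x ≠ k)).toFinset := by
    ext x
    by_cases hx : x = k <;> simp [List.mem_toFinset, hx]
  rw [hfin, Finset.sum_insert hk]
  have hck : (k :: rest).count k = rest.count k + 1 := by
    simp
  rw [hck]
  congr 1
  apply Finset.sum_congr rfl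
  intro x hx
  have hxk : x ≠ k := by
    have hm := List.mem_toFinset.mp hx
    have := (List.mem_filter.mp hm).2
    simpa using this
  have : (k :: rest).count x = (rest.filter (fun x => x ≠ k)).count x := by
    simp [List.count_filter, hxk, Ne.symm hxk]
  rw [this]

-- main run-length-scan invariant on a sorted tail
theorem cclScan_sorted (l : List Int) (total run : Int) (p : Int)
    (hs : l.Pairwise (· ≤ ·)) (hp : ∀ x ∈ l, p ≤ x) :
    cclScan l total run (some p)
      = total + (if run + l.count p == (8 : Int) then 1 else 0)
        + gcount (l.filter (fun x => x ≠ p)) := by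
  induction l generalizing total run p with
  | nil => simp [cclScan, gcount]
  | cons k rest ih =>
    rcases List.pairwise_cons.mp hs with ⟨hk, hrest⟩
    by_cases hkp : k = p
    · subst hkp
      have : cclScan (k :: rest) total run (some k) = cclScan rest total (run + 1) (some k) := by
        simp [cclScan]
      rw [this, ih total (run + 1) k hrest hk]
      simp only [List.count_cons_self, List.filter_cons]
      have hd : (decide (k ≠ k)) = false := by simp
      rw [hd]
      have hcond : ((run + 1 + (List.count k rest : Int)) == 8) = ((run + ((1 + List.count k rest : Nat) : Int)) == 8) := by
        push_cast
        ring_nf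
      simp only [if_neg (by decide : ¬ false = true)]
      rw [hcond]
      ring_nf
    · have hne : (some k == some p) = false := by simp [hkp]
      have : cclScan (k :: rest) total run (some p)
          = cclScan rest (total + (if run == (8 : Int) then 1 else 0)) 1 (some k) := by
        simp [cclScan, hne]
      rw [this, ih _ 1 k hrest hk]
      have hplt : p < k := lt_of_le_of_ne (hp k (List.mem_cons_self ..)) (fun h => hkp h.symm)
      have hpnot : p ∉ k :: rest := by
        intro hmem
        rcases List.mem_cons.mp hmem with h | h
        · exact hkp h.symm
        · exact absurd (hk p h) (not_le.mpr hplt)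
      have hcount0 : (k :: rest).count p = 0 := List.count_eq_zero.mpr hpnot
      have hfilt : (k :: rest).filter (fun x => x ≠ p) = k :: rest := by
        apply List.filter_eq_self.mpr
        intro x hx
        simp only [ne_eq, decide_eq_true_eq]
        intro hxp; subst hxp; exact hpnot hx
      rw [hcount0, hfilt, gcount_cons]
      ring_nf

theorem cclScan_start (l : List Int) (hs : l.Pairwise (· ≤ ·)) :
    cclScan l 0 0 none = gcount l := by
  cases l with
  | nil => simp [cclScan, gcount]
  | cons k rest =>
    have h1 : cclScan (k :: rest) 0 0 none
        = cclScan rest 0 1 (some k) := by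
      simp [cclScan]
    rcases List.pairwise_cons.mp hs with ⟨hk, hrest⟩
    rw [h1, cclScan_sorted rest 0 1 k hrest hk, gcount_cons]
    ring_nf

-- ===== VERDICT =====
theorem check_complete_lines_spec : Claim_equal_check_complete_lines := by
  intro filled height _
  unfold Spec_check_complete_lines check_complete_lines_alt
  rw [ccl_A_eq_gcount]
  have hs := PySem.List.sorted_pairwise (xs := filled.map (fun cl => height - cl.2)) (key := fun x => x)
  rw [cclScan_start _ hs]
  exact (gcount_perm (PySem.List.sorted_perm ..)).symm
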